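-- pv_equiv track=rewrite | github.com/istSOS/istsos-miu | src/sta2rest/sta2rest.py | split_but_not_between
-- ===== SOURCE A (Python) =====
-- def split_but_not_between(query: str, split: str, delim1: str, delim2: str) -> list:
--     """
--     Splits a string by a given character, but only if the character is not between two other given characters.
--
--     Args:
--         query (str): The string to split.
--         split (str): The character to split by.
--         delim1 (str): The first delimiter character.
--         delim2 (str): The second delimiter character.
--
--     Returns:
--         list: The list of substrings.
--     """
--
--     result = []
--     stack = []
--     current = ''
--     for char in query:
--         # Check if the current character is a delimiter
--         if char == delim1:
--             current += char
--             stack.append(delim1)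
--         # Check if the current character is a delimiter
--         elif char == delim2:
--             current += char
--             # Check if the current delimiter is the same as the last one in the stack
--             if stack and stack[-1] == delim1:
--                 stack.pop()
--         elif char == split:
--             if stack:
--                 # Inside parentheses, treat comma as part of the current substring
--                 current += char
--             else:
--                 # Outside parentheses, split the string and reset the current substring
--                 result.append(current.strip())
--                 current = ''
--         else:
--             # Regular character, add it to the current substring
--             current += char
--
--     # Add the last substring
--     if current:
--         result.append(current.strip())
--
--     return result
-- ===== SOURCE B (Python) =====
-- def split_but_not_between(query: str, split: str, delim1: str, delim2: str) -> list:
--     # Index-table strategy: one pass records top-level split positions, then slices.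
--     cuts = []
--     depth = 0
--     for i, ch in enumerate(query):
--         if ch == delim1:
--             depth += 1
--         elif ch == delim2:
--             if depth > 0:
--                 depth -= 1
--         elif ch == split and depth == 0:
--             cuts.append(i)
--     parts = []
--     start = 0
--     for c in cuts:
--         parts.append(query[start:c].strip())
--         start = c + 1
--     if start < len(query):
--         parts.append(query[start:].strip())
--     return parts
-- ===== Notes on version B (the rewrite author's own statement) =====
-- stated objective: alternative
-- what changed: Replaces A's accumulate-and-reset string building (result/stack/current with repeated concatenation) by a two-phase index-table scheme: one pass with an integer nesting depth records the indices of top-level split characters, then the result is produced by slicing the query between consecutive recorded indices and stripping each slice.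
import Mathlib
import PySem

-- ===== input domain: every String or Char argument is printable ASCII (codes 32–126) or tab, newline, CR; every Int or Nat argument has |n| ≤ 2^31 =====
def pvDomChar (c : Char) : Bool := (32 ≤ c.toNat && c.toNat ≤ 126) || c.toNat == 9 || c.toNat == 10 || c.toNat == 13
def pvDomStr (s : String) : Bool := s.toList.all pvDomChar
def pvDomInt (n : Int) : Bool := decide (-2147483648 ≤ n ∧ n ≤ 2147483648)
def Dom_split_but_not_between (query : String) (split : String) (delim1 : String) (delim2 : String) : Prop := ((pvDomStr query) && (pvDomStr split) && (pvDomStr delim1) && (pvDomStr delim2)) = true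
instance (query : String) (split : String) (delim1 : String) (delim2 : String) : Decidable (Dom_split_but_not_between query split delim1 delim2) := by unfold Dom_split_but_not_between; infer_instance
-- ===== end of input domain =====

-- B replaces A's accumulate-and-reset string building by one pass recording top-level
-- split indices and a slicing pass (objective: alternative decomposition, same cost).

-- Python's `char == delim` where char is one character of the string: true iff delim is that one-char string
def pvIsC (c : Char) (s : String) : Bool := s.toList == [c]

-- ===== PORT A =====
-- loop body of A: state (result, stack, current); current kept as List Char (string concat on the list side)
def pvStepA (split : String) (delim1 : String) (delim2 : String)
    (st : List String × List String × List Char) (c : Char) :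
    List String × List String × List Char :=
  if pvIsC c delim1 then (st.1, st.2.1 ++ [delim1], st.2.2 ++ [c])
  else if pvIsC c delim2 then
    (st.1, if st.2.1 ≠ [] ∧ st.2.1.getLast? = some delim1 then st.2.1.dropLast else st.2.1, st.2.2 ++ [c])
  else if pvIsC c split then
    (if st.2.1 ≠ [] then (st.1, st.2.1, st.2.2 ++ [c])
     else (st.1 ++ [String.ofList (PySem.Chars.strip st.2.2)], st.2.1, []))
  else (st.1, st.2.1, st.2.2 ++ [c])

def split_but_not_between (query : String) (split : String) (delim1 : String) (delim2 : String) : List String :=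
  let st := query.toList.foldl (pvStepA split delim1 delim2) ([], [], [])
  if st.2.2 ≠ [] then st.1 ++ [String.ofList (PySem.Chars.strip st.2.2)] else st.1

-- ===== PORT B =====
-- pass 1 body of B: state (cuts, depth); a top-level split character records its index
def pvStepScan (split : String) (delim1 : String) (delim2 : String)
    (st : List Int × Int) (p : Int × Char) : List Int × Int :=
  if pvIsC p.2 delim1 then (st.1, st.2 + 1)
  else if pvIsC p.2 delim2 then (st.1, if st.2 > 0 then st.2 - 1 else st.2)
  else if pvIsC p.2 split && st.2 == 0 then (st.1 ++ [p.1], st.2)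
  else (st.1, st.2)

def split_but_not_between_alt (query : String) (split : String) (delim1 : String) (delim2 : String) : List String :=
  let cs := query.toList
  let scan := (PySem.List.enumerate cs 0).foldl (pvStepScan split delim1 delim2) ([], 0)
  let pp := scan.1.foldl
    (fun (st : List String × Int) c =>
      (st.1 ++ [String.ofList (PySem.Chars.strip (PySem.Chars.slice cs (some st.2) (some c)))], c + 1))
    ([], 0)
  if pp.2 < (cs.length : Int) then
    pp.1 ++ [String.ofList (PySem.Chars.strip (PySem.Chars.slice cs (some pp.2) none))]
  else pp.1

-- ===== PRECONDITION & SPEC =====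
def Spec_split_but_not_between (query : String) (split : String) (delim1 : String) (delim2 : String) (out : List String) : Prop := out = split_but_not_between_alt query split delim1 delim2
instance (query : String) (split : String) (delim1 : String) (delim2 : String) (out : List String) : Decidable (Spec_split_but_not_between query split delim1 delim2 out) := by unfold Spec_split_but_not_between; infer_instance

-- ===== CLAIM (what is proved, stated in full; the proofs are below) =====
def Claim_equal_split_but_not_between : Prop := ∀ (query : String) (split : String) (delim1 : String) (delim2 : String), Dom_split_but_not_between query split delim1 delim2 → Spec_split_but_not_between query split delim1 delim2 (split_but_not_between query split delim1 delim2)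

-- ===== LEMMAS AND PROOFS =====

-- Reference loop: A's stack is always `replicate d delim1`, so it collapses to a depth counter
def pvStepR (split : String) (delim1 : String) (delim2 : String)
    (st : List String × Nat × List Char) (c : Char) : List String × Nat × List Char :=
  if pvIsC c delim1 then (st.1, st.2.1 + 1, st.2.2 ++ [c])
  else if pvIsC c delim2 then (st.1, st.2.1 - 1, st.2.2 ++ [c])
  else if pvIsC c split then
    (if st.2.1 ≠ 0 then (st.1, st.2.1, st.2.2 ++ [c])
     else (st.1 ++ [String.ofList (PySem.Chars.strip st.2.2)], st.2.1, []))
  else (st.1, st.2.1, st.2.2 ++ [c])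

-- the list of top-level split indices produced by B's first pass, as structural recursion
def pvCuts (split : String) (delim1 : String) (delim2 : String) : List Char → Int → Int → List Int
  | [], _, _ => []
  | c :: l, i, d =>
    if pvIsC c delim1 then pvCuts split delim1 delim2 l (i + 1) (d + 1)
    else if pvIsC c delim2 then pvCuts split delim1 delim2 l (i + 1) (if d > 0 then d - 1 else d)
    else if pvIsC c split && d == 0 then i :: pvCuts split delim1 delim2 l (i + 1) d
    else pvCuts split delim1 delim2 l (i + 1) d

-- the final depth of B's first pass
def pvDep (split : String) (delim1 : String) (delim2 : String) : List Char → Int → Int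
  | [], d => d
  | c :: l, d =>
    if pvIsC c delim1 then pvDep split delim1 delim2 l (d + 1)
    else if pvIsC c delim2 then pvDep split delim1 delim2 l (if d > 0 then d - 1 else d)
    else pvDep split delim1 delim2 l d

lemma pv_scan_eq (split delim1 delim2 : String) :
    ∀ (l : List Char) (i : Int) (cuts : List Int) (d : Int),
      (PySem.List.enumerate l i).foldl (pvStepScan split delim1 delim2) (cuts, d)
        = (cuts ++ pvCuts split delim1 delim2 l i d, pvDep split delim1 delim2 l d) := by
  intro l
  induction l with
  | nil => intro i cuts d; simp [PySem.List.enumerate_nil, pvCuts, pvDep]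
  | cons c l ih =>
    intro i cuts d
    rw [PySem.List.enumerate_cons]
    simp only [List.foldl_cons]
    by_cases h1 : pvIsC c delim1
    · simp [pvStepScan, pvCuts, pvDep, h1, ih]
    · by_cases h2 : pvIsC c delim2
      · simp [pvStepScan, pvCuts, pvDep, h1, h2, ih]
      · by_cases h3 : pvIsC c split && d == 0
        · simp [pvStepScan, pvCuts, pvDep, h1, h2, h3, ih]
        · simp [pvStepScan, pvCuts, pvDep, h1, h2, h3, ih]

-- A's fold with stack `replicate d delim1` mirrors the depth-counter fold
lemma pv_A_eq_R (split delim1 delim2 : String) :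
    ∀ (l : List Char) (res : List String) (d : Nat) (cur : List Char),
      l.foldl (pvStepA split delim1 delim2) (res, List.replicate d delim1, cur)
        = (fun st : List String × Nat × List Char => (st.1, List.replicate st.2.1 delim1, st.2.2))
            (l.foldl (pvStepR split delim1 delim2) (res, d, cur)) := by
  intro l
  induction l with
  | nil => intro res d cur; rfl
  | cons c l ih =>
    intro res d cur
    simp only [List.foldl_cons]
    by_cases h1 : pvIsC c delim1
    · rw [show pvStepA split delim1 delim2 (res, List.replicate d delim1, cur) c
            = (res, List.replicate (d + 1) delim1, cur ++ [c]) by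
          simp [pvStepA, h1, List.replicate_succ' ]]
      rw [ih]
      simp [pvStepR, h1]
    · by_cases h2 : pvIsC c delim2
      · rw [show pvStepA split delim1 delim2 (res, List.replicate d delim1, cur) c
              = (res, List.replicate (d - 1) delim1, cur ++ [c]) by
            cases d with
            | zero => simp [pvStepA, h1, h2]
            | succ n =>
              simp [pvStepA, h1, h2, List.getLast?_replicate, List.dropLast_replicate]
          ]
        rw [ih]; simp [pvStepR, h1, h2]
      · by_cases h3 : pvIsC c split
        · cases d with
          | zero =>
            rw [show pvStepA split delim1 delim2 (res, List.replicate 0 delim1, cur) c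
                  = (res ++ [String.ofList (PySem.Chars.strip cur)], List.replicate 0 delim1, []) by
                simp [pvStepA, h1, h2, h3]]
            rw [ih]; simp [pvStepR, h1, h2, h3]
          | succ n =>
            rw [show pvStepA split delim1 delim2 (res, List.replicate (n+1) delim1, cur) c
                  = (res, List.replicate (n+1) delim1, cur ++ [c]) by
                simp [pvStepA, h1, h2, h3]]
            rw [ih]; simp [pvStepR, h1, h2, h3]
        · rw [show pvStepA split delim1 delim2 (res, List.replicate d delim1, cur) c
                = (res, List.replicate d delim1, cur ++ [c]) by
              simp [pvStepA, h1, h2, h3]]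
          rw [ih]; simp [pvStepR, h1, h2, h3]

lemma pv_take_snoc (cs : List Char) (start i : Nat) (hs : start ≤ i) (hi : i < cs.length) :
    (cs.drop start).take (i - start) ++ [cs[i]] = (cs.drop start).take (i + 1 - start) := by
  have h1 : i + 1 - start = (i - start) + 1 := by omega
  rw [h1, List.take_succ]
  have h2 : (cs.drop start)[i - start]? = some cs[i] := by
    rw [List.getElem?_drop]
    have : start + (i - start) = i := by omega
    rw [this, List.getElem?_eq_getElem hi]
  simp [h2]

-- the bridge: B's slicing pass over the recorded cuts equals A's depth-counter fold, finalized
lemma pv_bridge (split delim1 delim2 : String) :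
    ∀ (l : List Char) (cs : List Char) (i dn start : Nat) (res : List String),
      cs.drop i = l → start ≤ i → i ≤ cs.length →
      (let pp := (pvCuts split delim1 delim2 l (i : Int) (dn : Int)).foldl
          (fun (st : List String × Int) c =>
            (st.1 ++ [String.ofList (PySem.Chars.strip (PySem.Chars.slice cs (some st.2) (some c)))], c + 1))
          (res, (start : Int));
       if pp.2 < (cs.length : Int) then
         pp.1 ++ [String.ofList (PySem.Chars.strip (PySem.Chars.slice cs (some pp.2) none))]
       else pp.1)
      = (let r := l.foldl (pvStepR split delim1 delim2) (res, dn, (cs.drop start).take (i - start));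
         if r.2.2 ≠ [] then r.1 ++ [String.ofList (PySem.Chars.strip r.2.2)] else r.1) := by
  intro l
  induction l with
  | nil =>
    intro cs i dn start res hdrop hs hi
    have hlen : i = cs.length := by
      have := List.drop_eq_nil_iff.mp hdrop
      omega
    subst hlen
    simp only [pvCuts, List.foldl_nil]
    have hslice : PySem.Chars.slice cs (some (start : Int)) none = cs.drop start := by
      simp [PySem.Chars.slice_eq_listSlice, PySem.List.slice_from_natCast]
    have hcur : (cs.drop start).take (cs.length - start) = cs.drop start :=
      List.take_of_length_le (by simp)
    simp only [hslice, hcur]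
    by_cases hlt : start < cs.length
    · rw [if_pos (by exact_mod_cast hlt), if_pos (by simp [List.drop_eq_nil_iff]; omega)]
    · rw [if_neg (by exact_mod_cast hlt), if_neg (by simp [List.drop_eq_nil_iff]; omega)]
  | cons c l ih =>
    intro cs i dn start res hdrop hs hi
    have hi' : i < cs.length := by
      by_contra h
      rw [List.drop_eq_nil_iff.mpr (by omega)] at hdrop
      exact (List.cons_ne_nil _ _) hdrop.symm
    have hget : cs[i]'hi' = c := by
      have h0 : (cs.drop i)[0]? = some c := by rw [hdrop]; rfl
      rw [List.getElem?_drop] at h0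
      rw [List.getElem?_eq_getElem (by omega)] at h0
      simpa using h0
    have hdrop' : cs.drop (i + 1) = l := by
      have h1 : cs.drop (i + 1) = (cs.drop i).drop 1 := by
        rw [List.drop_drop]
      rw [h1, hdrop]; rfl
    have hsnoc : ∀ st : Nat, st ≤ i →
        (cs.drop st).take (i - st) ++ [c] = (cs.drop st).take (i + 1 - st) := by
      intro st hst
      rw [← hget]
      exact pv_take_snoc cs st i hst hi'
    by_cases h1 : pvIsC c delim1
    · have hcuts : pvCuts split delim1 delim2 (c :: l) (i : Int) (dn : Int)
          = pvCuts split delim1 delim2 l ((i : Int) + 1) ((dn : Int) + 1) := by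
        simp [pvCuts, h1]
      have hstep : pvStepR split delim1 delim2 (res, dn, (cs.drop start).take (i - start)) c
          = (res, dn + 1, (cs.drop start).take (i + 1 - start)) := by
        simp [pvStepR, h1, hsnoc start hs]
      have hih := ih cs (i + 1) (dn + 1) start res hdrop' (by omega) (by omega)
      push_cast at hih
      simp only [List.foldl_cons, hcuts, hstep]
      exact hih
    · by_cases h2 : pvIsC c delim2
      · have hc : (if (dn : Int) > 0 then (dn : Int) - 1 else (dn : Int)) = ((dn - 1 : Nat) : Int) := by
          split_ifs <;> omega
        have hcuts : pvCuts split delim1 delim2 (c :: l) (i : Int) (dn : Int)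
            = pvCuts split delim1 delim2 l ((i : Int) + 1) ((dn - 1 : Nat) : Int) := by
          rw [← hc]; simp [pvCuts, h1, h2]
        have hstep : pvStepR split delim1 delim2 (res, dn, (cs.drop start).take (i - start)) c
            = (res, dn - 1, (cs.drop start).take (i + 1 - start)) := by
          simp [pvStepR, h1, h2, hsnoc start hs]
        have hih := ih cs (i + 1) (dn - 1) start res hdrop' (by omega) (by omega)
        push_cast at hih
        simp only [List.foldl_cons, hcuts, hstep]
        exact hih
      · by_cases h3 : pvIsC c split
        · by_cases hd : dn = 0
          · subst hd
            have hcuts : pvCuts split delim1 delim2 (c :: l) (i : Int) ((0 : Nat) : Int)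
                = (i : Int) :: pvCuts split delim1 delim2 l ((i : Int) + 1) ((0 : Nat) : Int) := by
              simp [pvCuts, h1, h2, h3]
            have hstep : pvStepR split delim1 delim2 (res, 0, (cs.drop start).take (i - start)) c
                = (res ++ [String.ofList (PySem.Chars.strip ((cs.drop start).take (i - start)))], 0, []) := by
              simp [pvStepR, h1, h2, h3]
            have hslice : PySem.Chars.slice cs (some (start : Int)) (some (i : Int))
                = (cs.drop start).take (i - start) := by
              simp [PySem.List.slice_natCast]
            have hih := ih cs (i + 1) 0 (i + 1)
                (res ++ [String.ofList (PySem.Chars.strip ((cs.drop start).take (i - start)))])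
                hdrop' (le_refl _) (by omega)
            simp only [Nat.sub_self, List.take_zero] at hih
            push_cast at hih
            simp only [List.foldl_cons, hcuts, hstep, hslice]
            exact hih
          · have hcuts : pvCuts split delim1 delim2 (c :: l) (i : Int) (dn : Int)
                = pvCuts split delim1 delim2 l ((i : Int) + 1) (dn : Int) := by
              have hz : (((dn : Int)) == 0) = false := by
                simp [hd]
              simp [pvCuts, h1, h2, h3, hz]
            have hstep : pvStepR split delim1 delim2 (res, dn, (cs.drop start).take (i - start)) c
                = (res, dn, (cs.drop start).take (i + 1 - start)) := by
              simp [pvStepR, h1, h2, h3, hd, hsnoc start hs]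
            have hih := ih cs (i + 1) dn start res hdrop' (by omega) (by omega)
            push_cast at hih
            simp only [List.foldl_cons, hcuts, hstep]
            exact hih
        · have hcuts : pvCuts split delim1 delim2 (c :: l) (i : Int) (dn : Int)
              = pvCuts split delim1 delim2 l ((i : Int) + 1) (dn : Int) := by
            simp [pvCuts, h1, h2, h3]
          have hstep : pvStepR split delim1 delim2 (res, dn, (cs.drop start).take (i - start)) c
              = (res, dn, (cs.drop start).take (i + 1 - start)) := by
            simp [pvStepR, h1, h2, h3, hsnoc start hs]
          have hih := ih cs (i + 1) dn start res hdrop' (by omega) (by omega)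
          push_cast at hih
          simp only [List.foldl_cons, hcuts, hstep]
          exact hih

-- ===== VERDICT (by name: the statement is the Claim_ definition above) =====
theorem split_but_not_between_spec : Claim_equal_split_but_not_between := by
  intro query split delim1 delim2 _
  unfold Spec_split_but_not_between split_but_not_between split_but_not_between_alt
  have hb := pv_bridge split delim1 delim2 query.toList query.toList 0 0 0 []
    (by simp) (le_refl 0) (by simp)
  simp only [Nat.cast_zero, Nat.sub_zero, List.drop_zero, List.take_zero] at hb
  have ha := pv_A_eq_R split delim1 delim2 query.toList [] 0 []
  simp only [List.replicate_zero] at ha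
  simp only [pv_scan_eq, List.nil_append, ha]
  exact hb.symm
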